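-- pv_equiv track=rewrite | github.com/n3d1m/YouChooseBackend | app.py | price_range_convert
-- ===== SOURCE A (Python) =====
-- def price_range_convert(arr):
--     returnObj = {
--         'minprice': '',
--         'maxprice': ''
--     }
--
--     if(arr == None):
--         returnObj['maxprice'] = None
--         returnObj['minprice'] = None
--
--     else:
--
--         arr = arr.split(', ')
--         intArr = []
--
--         for i in arr:
--
--             intArr.append(len(i)-1)
--
--         intArr.sort()
--
--         if len(intArr) == 1:
--             returnObj['maxprice'] = intArr[0] if intArr[0] > 0 else intArr[0]+1
--             returnObj['minprice'] = None
--         else: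
--             returnObj['maxprice'] = max(intArr)
--             returnObj['minprice'] = min(intArr)
--
--     return returnObj
-- ===== SOURCE B (Python) =====
-- def price_range_convert(arr):
--     if arr is None:
--         return {'minprice': None, 'maxprice': None}
--     tokens = arr.split(', ')
--     lo = hi = len(tokens[0]) - 1
--     for t in tokens[1:]:
--         v = len(t) - 1
--         if v < lo:
--             lo = v
--         if hi < v:
--             hi = v
--     if len(tokens) == 1:
--         return {'minprice': None, 'maxprice': hi if hi > 0 else hi + 1}
--     return {'minprice': lo, 'maxprice': hi}
-- ===== Notes on version B (the rewrite author's own statement) =====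
-- stated objective: simpler
-- what changed: B replaces A's build-a-list / in-place sort / separate max() and min() scans by a single pass over the split tokens that maintains a running minimum and maximum (and a tokens-count check for the single-token special case).
import Mathlib
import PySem

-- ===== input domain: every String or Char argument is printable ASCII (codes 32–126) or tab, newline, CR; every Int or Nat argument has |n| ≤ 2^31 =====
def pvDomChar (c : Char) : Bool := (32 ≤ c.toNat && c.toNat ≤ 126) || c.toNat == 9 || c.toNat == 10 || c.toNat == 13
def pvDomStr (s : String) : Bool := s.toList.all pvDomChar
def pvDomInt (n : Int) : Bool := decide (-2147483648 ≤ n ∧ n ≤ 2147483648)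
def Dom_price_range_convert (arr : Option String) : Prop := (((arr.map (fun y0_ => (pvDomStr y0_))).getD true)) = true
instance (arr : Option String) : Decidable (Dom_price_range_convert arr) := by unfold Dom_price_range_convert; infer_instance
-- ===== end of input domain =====

-- B replaces A's build-list / sort / max() / min() pipeline by a single pass over the split
-- tokens that tracks a running minimum and maximum (objective: simpler, no sort).

-- ===== PORT A =====
-- A's body after `arr = arr.split(', ')`
def priceA_core (toks : List String) : List (String × Option Int) :=
  let intArr := toks.map (fun i => PySem.Str.len i - 1)
  let intArr := PySem.List.sorted intArr (fun x => x) false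
  if intArr.length = 1 then
    [("minprice", none),
     ("maxprice", (PySem.List.pyGet? intArr 0).map (fun v => if v > 0 then v else v + 1))]
  else
    [("minprice", PySem.List.min? intArr (fun x => x)),
     ("maxprice", PySem.List.max? intArr (fun x => x))]

def price_range_convert (arr : Option String) : List (String × Option Int) :=
  match arr with
  | none => [("minprice", none), ("maxprice", none)]
  | some s =>
    match PySem.Str.split? s ", " with
    | some toks => priceA_core toks
    | none => []  -- unreachable: the separator ", " is non-empty, so split? never returns none

-- ===== PORT B =====
-- B's for-loop over tokens[1:], carrying the running (lo, hi)
def prcPass : List String → Int → Int → Int × Int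
  | [], lo, hi => (lo, hi)
  | t :: rest, lo, hi =>
    let v := PySem.Str.len t - 1
    prcPass rest (if v < lo then v else lo) (if hi < v then v else hi)

def priceB_core : List String → List (String × Option Int)
  | [] => [("minprice", none), ("maxprice", none)]  -- unreachable: split yields ≥ 1 token
  | t :: rest =>
    let v0 := PySem.Str.len t - 1
    let p := prcPass rest v0 v0
    if rest.isEmpty then
      [("minprice", none), ("maxprice", some (if p.2 > 0 then p.2 else p.2 + 1))]
    else
      [("minprice", some p.1), ("maxprice", some p.2)]

def price_range_convert_alt (arr : Option String) : List (String × Option Int) :=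
  match arr with
  | none => [("minprice", none), ("maxprice", none)]
  | some s =>
    match PySem.Str.split? s ", " with
    | some toks => priceB_core toks
    | none => []  -- unreachable: the separator ", " is non-empty, so split? never returns none

-- ===== PRECONDITION & SPEC =====
def Spec_price_range_convert (arr : Option String) (out : List (String × Option Int)) : Prop := out = price_range_convert_alt arr
instance (arr : Option String) (out : List (String × Option Int)) : Decidable (Spec_price_range_convert arr out) := by unfold Spec_price_range_convert; infer_instance

-- ===== CLAIM (what is proved, stated in full; the proofs are below) =====
def Claim_equal_price_range_convert : Prop := ∀ (arr : Option String), Dom_price_range_convert arr → Spec_price_range_convert arr (price_range_convert arr)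

-- ===== LEMMAS AND PROOFS =====

-- B's loop is the running min/max fold over the token values
theorem prcPass_eq (ls : List String) (a b : Int) :
    prcPass ls a b =
      ((ls.map (fun t => PySem.Str.len t - 1)).foldl min a,
       (ls.map (fun t => PySem.Str.len t - 1)).foldl max b) := by
  induction ls generalizing a b with
  | nil => simp [prcPass]
  | cons t rest ih =>
    simp only [prcPass, List.map_cons, List.foldl_cons]
    rw [ih]
    have h1 : (if PySem.Str.len t - 1 < a then PySem.Str.len t - 1 else a)
        = min a (PySem.Str.len t - 1) := by omega
    have h2 : (if b < PySem.Str.len t - 1 then PySem.Str.len t - 1 else b)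
        = max b (PySem.Str.len t - 1) := by omega
    rw [h1, h2]

-- max() of the sorted list is the running max started at the head value
theorem max?_sorted_cons (v0 : Int) (l : List Int) :
    PySem.List.max? (PySem.List.sorted (v0 :: l) (fun x => x) false) (fun x => x)
      = some (l.foldl max v0) := by
  cases h : PySem.List.max? (PySem.List.sorted (v0 :: l) (fun x => x) false) (fun x => x) with
  | none =>
    have := (PySem.List.max?_eq_none_iff _ _).mp h
    rw [PySem.List.sorted_eq_nil_iff] at this
    simp at this
  | some m =>
    have hm_mem : m ∈ v0 :: l := (PySem.List.mem_sorted _ _ _ _).mp (PySem.List.max?_mem h)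
    have hm_ub : ∀ y ∈ v0 :: l, y ≤ m := fun y hy =>
      PySem.List.max?_isMax h y ((PySem.List.mem_sorted _ _ _ _).mpr hy)
    have hhi_mem : l.foldl max v0 ∈ v0 :: l := by
      rcases PySem.List.foldl_max_mem l v0 with h' | h'
      · rw [h']; exact List.mem_cons_self
      · exact List.mem_cons_of_mem _ h'
    have hhi_ub : ∀ y ∈ v0 :: l, y ≤ l.foldl max v0 := by
      intro y hy
      rcases List.mem_cons.mp hy with rfl | hy
      · exact (PySem.List.le_foldl_max l _).1
      · exact (PySem.List.le_foldl_max l _).2 y hy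
    exact congrArg some (le_antisymm (hhi_ub m hm_mem) (hm_ub _ hhi_mem))

-- min() of the sorted list is the running min started at the head value
theorem min?_sorted_cons (v0 : Int) (l : List Int) :
    PySem.List.min? (PySem.List.sorted (v0 :: l) (fun x => x) false) (fun x => x)
      = some (l.foldl min v0) := by
  cases h : PySem.List.min? (PySem.List.sorted (v0 :: l) (fun x => x) false) (fun x => x) with
  | none =>
    have := (PySem.List.min?_eq_none_iff _ _).mp h
    rw [PySem.List.sorted_eq_nil_iff] at this
    simp at this
  | some m =>
    have hm_mem : m ∈ v0 :: l := (PySem.List.mem_sorted _ _ _ _).mp (PySem.List.min?_mem h)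
    have hm_lb : ∀ y ∈ v0 :: l, m ≤ y := fun y hy =>
      PySem.List.min?_isMin h y ((PySem.List.mem_sorted _ _ _ _).mpr hy)
    have hlo_mem : l.foldl min v0 ∈ v0 :: l := by
      rcases PySem.List.foldl_min_mem l v0 with h' | h'
      · rw [h']; exact List.mem_cons_self
      · exact List.mem_cons_of_mem _ h'
    have hlo_lb : ∀ y ∈ v0 :: l, l.foldl min v0 ≤ y := by
      intro y hy
      rcases List.mem_cons.mp hy with rfl | hy
      · exact (PySem.List.foldl_min_le l _).1
      · exact (PySem.List.foldl_min_le l _).2 y hy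
    exact congrArg some (le_antisymm (hm_lb _ hlo_mem) (hlo_lb m hm_mem))

theorem price_core_eq (toks : List String) : priceA_core toks = priceB_core toks := by
  match toks with
  | [] => decide
  | [t] =>
    simp only [priceA_core, priceB_core, List.map_cons, List.map_nil]
    rw [PySem.List.sorted_eq_self_of_pairwise _ _ (List.pairwise_singleton _ _)]
    simp [prcPass, PySem.List.pyGet?, PySem.List.pyIdx?]
  | t :: u :: rest =>
    simp only [priceA_core, priceB_core, List.map_cons, List.isEmpty_cons]
    rw [prcPass_eq, min?_sorted_cons, max?_sorted_cons,
        if_neg (by rw [PySem.List.length_sorted]; simp)]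
    simp

-- ===== VERDICT (by name: the statement is the Claim_ definition above) =====
theorem price_range_convert_spec : Claim_equal_price_range_convert := by
  intro arr _
  unfold Spec_price_range_convert
  cases arr with
  | none => rfl
  | some s =>
    simp only [price_range_convert, price_range_convert_alt]
    cases h : PySem.Str.split? s ", " with
    | none => rfl
    | some toks => exact price_core_eq toks
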